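-- pv_equiv track=rewrite | github.com/pypi-data/pypi-mirror-402 | packages/ml4t-diagnostic/ml4t_diagnostic-0.1.0a1.tar.gz/ml4t_diagnostic-0.1.0a1/tests/test_splitters/test_combinatorial.py | _get_contiguous_ranges
-- ===== SOURCE A (Python) =====
-- def _get_contiguous_ranges(indices):
--     """Helper to identify contiguous ranges in indices."""
--     if len(indices) == 0:
--         return []
--
--     indices = sorted(indices)
--     ranges = []
--     start = indices[0]
--     end = indices[0]
--
--     for i in indices[1:]:
--         if i == end + 1:
--             end = i
--         else:
--             ranges.append((start, end))
--             start = end = i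
--
--     ranges.append((start, end))
--     return ranges
-- ===== SOURCE B (Python) =====
-- def _get_contiguous_ranges(indices):
--     """Boundary detection: find the breaks between sorted neighbours, read off
--     all range starts and all range ends separately, and zip them together."""
--     if len(indices) == 0:
--         return []
--     xs = sorted(indices)
--     breaks = [(a, b) for a, b in zip(xs, xs[1:]) if b != a + 1]
--     starts = [xs[0]] + [b for a, b in breaks]
--     ends = [a for a, b in breaks] + [xs[-1]]
--     return list(zip(starts, ends))
-- ===== Notes on version B (the rewrite author's own statement) =====
-- stated objective: alternative
-- what changed: Replaces A's stateful single-pass merge (start/end variables mutated in a loop) by boundary detection: one pass over adjacent sorted pairs collects the break points, the starts and ends lists are read off from the breaks, and the ranges are the zip of the two.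
import Mathlib
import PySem

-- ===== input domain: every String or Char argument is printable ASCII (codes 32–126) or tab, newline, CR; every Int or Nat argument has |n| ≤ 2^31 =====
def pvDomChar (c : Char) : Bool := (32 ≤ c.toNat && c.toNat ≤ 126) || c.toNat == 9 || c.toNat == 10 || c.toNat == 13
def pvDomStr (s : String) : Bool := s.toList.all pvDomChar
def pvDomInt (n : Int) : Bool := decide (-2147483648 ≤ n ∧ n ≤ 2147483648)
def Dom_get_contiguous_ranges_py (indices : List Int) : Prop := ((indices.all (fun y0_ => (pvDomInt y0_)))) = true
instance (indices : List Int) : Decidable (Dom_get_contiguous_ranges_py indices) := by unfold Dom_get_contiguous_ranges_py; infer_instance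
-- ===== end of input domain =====

-- B replaces A's stateful merge scan by boundary detection (breaks between sorted
-- neighbours, then starts/ends read off and zipped); objective: alternative, same cost.

-- ===== PORT A =====
-- the for-loop of A: state (start, end, ranges), then the trailing append
def goA (start en : Int) (ranges : List (Int × Int)) : List Int → List (Int × Int)
  | [] => ranges ++ [(start, en)]
  | i :: t => if i = en + 1 then goA start i ranges t
              else goA i i (ranges ++ [(start, en)]) t

def get_contiguous_ranges_py (indices : List Int) : List (Int × Int) :=
  if indices.length = 0 then []
  else
    match PySem.List.sorted indices (fun x => x) false with
    | [] => []            -- unreachable: sorted of a nonempty list is nonempty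
    | x :: xs => goA x x [] xs

-- ===== PORT B =====
def get_contiguous_ranges_py_alt (indices : List Int) : List (Int × Int) :=
  if indices.length = 0 then []
  else
    let xs := PySem.List.sorted indices (fun x => x) false
    -- breaks = [(a, b) for a, b in zip(xs, xs[1:]) if b != a + 1]
    let breaks := (xs.zip (PySem.List.slice xs (some 1) none)).filter (fun p => p.2 ≠ p.1 + 1)
    -- starts = [xs[0]] + [b for a, b in breaks]   (xs[0]: in range, xs nonempty here)
    let starts := [(PySem.List.pyGet? xs 0).getD 0] ++ breaks.map Prod.snd
    -- ends = [a for a, b in breaks] + [xs[-1]]    (xs[-1]: in range, xs nonempty here)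
    let ends := breaks.map Prod.fst ++ [(PySem.List.pyGet? xs (-1)).getD 0]
    starts.zip ends

-- ===== PRECONDITION & SPEC =====
def Spec_get_contiguous_ranges_py (indices : List Int) (out : List (Int × Int)) : Prop := out = get_contiguous_ranges_py_alt indices
instance (indices : List Int) (out : List (Int × Int)) : Decidable (Spec_get_contiguous_ranges_py indices out) := by unfold Spec_get_contiguous_ranges_py; infer_instance

-- ===== CLAIM (what is proved, stated in full; the proofs are below) =====
def Claim_equal_get_contiguous_ranges_py : Prop := ∀ (indices : List Int), Dom_get_contiguous_ranges_py indices → Spec_get_contiguous_ranges_py indices (get_contiguous_ranges_py indices)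

-- ===== LEMMAS AND PROOFS =====

-- reference form of the result: a foldr over the sorted list (head = current range)
def stepB (i : Int) (ranges : List (Int × Int)) : List (Int × Int) :=
  match ranges with
  | (a, b) :: r => if i = a - 1 then (i, b) :: r else (i, i) :: (a, b) :: r
  | [] => [(i, i)]

def coreB (l : List Int) : List (Int × Int) := l.foldr (fun i acc => stepB i acc) []

-- the front range of coreB (en :: xs) always starts at en
theorem coreB_head (en : Int) (xs : List Int) :
    ∃ b r, coreB (en :: xs) = (en, b) :: r := by
  cases xs with
  | nil => exact ⟨en, [], rfl⟩
  | cons i t =>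
    obtain ⟨b, r, h⟩ := coreB_head i t
    simp only [coreB, List.foldr] at h ⊢
    rw [h]
    by_cases hc : i = en + 1
    · exact ⟨b, r, by simp [stepB, hc]⟩
    · exact ⟨en, (i, b) :: r, by simp [stepB]; omega⟩

-- A-side invariant: A's loop equals rs ++ coreB (en :: xs) with the front start replaced by st
theorem goA_eq (xs : List Int) : ∀ (st en : Int) (rs : List (Int × Int)),
    goA st en rs xs = rs ++ (match coreB (en :: xs) with
                             | (_, b) :: r => (st, b) :: r
                             | [] => []) := by
  induction xs with
  | nil => intro st en rs; simp [goA, coreB, stepB]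
  | cons i t ih =>
    intro st en rs
    obtain ⟨b, r, h⟩ := coreB_head i t
    have hstep : coreB (en :: i :: t) = stepB en (coreB (i :: t)) := rfl
    rw [hstep, h]
    by_cases hc : i = en + 1
    · have : stepB en ((i, b) :: r) = (en, b) :: r := by simp [stepB]; omega
      rw [this]
      simp only [goA, if_pos hc]
      rw [ih st i rs, h, hc]
    · have : stepB en ((i, b) :: r) = (en, en) :: (i, b) :: r := by simp [stepB]; omega
      rw [this]
      simp only [goA, if_neg hc]
      rw [ih i i (rs ++ [(st, en)]), h]
      simp

-- B's break list, written over the tail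
def brks (l : List Int) : List (Int × Int) := (l.zip l.tail).filter (fun p => p.2 ≠ p.1 + 1)

-- B-side invariant: starts.zip ends equals the reference foldr
theorem B_core (t : List Int) : ∀ (x : Int),
    ((x :: (brks (x :: t)).map Prod.snd).zip
      ((brks (x :: t)).map Prod.fst ++ [((x :: t).getLast?).getD 0])) = coreB (x :: t) := by
  induction t with
  | nil => intro x; rfl
  | cons y t' ih =>
    intro x
    obtain ⟨b, r, hcb⟩ := coreB_head y t'
    have hB := ih y
    rw [hcb] at hB
    have hbr : brks (x :: y :: t') =
        (if y ≠ x + 1 then [(x, y)] else []) ++ brks (y :: t') := by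
      simp only [brks, List.tail, List.zip_cons_cons, List.filter]
      split_ifs with h <;> simp_all
    have hlast : ((x :: y :: t').getLast?).getD 0 = ((y :: t').getLast?).getD 0 := by
      simp [List.getLast?_cons_cons]
    obtain ⟨c, cs, hcons⟩ :
        ∃ c cs, (brks (y :: t')).map Prod.fst ++ [((y :: t').getLast?).getD 0] = c :: cs := by
      cases h : (brks (y :: t')).map Prod.fst ++ [((y :: t').getLast?).getD 0] with
      | nil => exact absurd h (by simp)
      | cons c cs => exact ⟨c, cs, rfl⟩
    rw [hcons] at hB
    simp only [List.zip_cons_cons] at hB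
    have hc : c = b := by injection hB with h1 _ ; injection h1 with _ h2
    have hrest : ((brks (y :: t')).map Prod.snd).zip cs = r := by
      injection hB
    have hcore : coreB (x :: y :: t') = stepB x ((y, b) :: r) := by
      show stepB x (coreB (y :: t')) = _
      rw [hcb]
    by_cases hy : y = x + 1
    · rw [hbr, if_neg (by omega)]
      simp only [List.nil_append, hlast, hcons, List.zip_cons_cons]
      rw [hcore]
      have : stepB x ((y, b) :: r) = (x, b) :: r := by simp [stepB]; omega
      rw [this, hc, hrest]
    · rw [hbr, if_pos hy]
      simp only [List.cons_append, List.nil_append, List.map_cons, hlast, hcons,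
        List.zip_cons_cons]
      rw [hcore]
      have : stepB x ((y, b) :: r) = (x, x) :: (y, b) :: r := by simp [stepB]; omega
      rw [this, hc, hrest]

-- ===== VERDICT (by name: the statement is the Claim_ definition above) =====
theorem get_contiguous_ranges_py_spec : Claim_equal_get_contiguous_ranges_py := by
  intro indices _
  unfold Spec_get_contiguous_ranges_py get_contiguous_ranges_py get_contiguous_ranges_py_alt
  by_cases hlen : indices.length = 0
  · simp [hlen]
  · rw [if_neg hlen, if_neg hlen]
    have hne : PySem.List.sorted indices (fun x => x) false ≠ [] := by
      intro h
      have := PySem.List.length_sorted (xs := indices) (key := fun x => x) (rev := false)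
      rw [h] at this
      simp at this
      omega
    cases hs : PySem.List.sorted indices (fun x => x) false with
    | nil => exact absurd hs hne
    | cons x xs =>
      simp only [PySem.List.slice_from_one, PySem.List.pyGet?_zero_cons,
        PySem.List.pyGet?_neg_one, Option.getD_some, List.tail_cons]
      rw [goA_eq]
      obtain ⟨b, r, h⟩ := coreB_head x xs
      rw [h]
      have hB := B_core xs x
      rw [h] at hB
      simpa [brks] using hB.symm
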